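-- pv_equiv track=rewrite | github.com/fnatvig/XSTL | preprocessing.py | get_wnd_goose_pkt_num
-- ===== SOURCE A (Python) =====
-- def get_wnd_goose_pkt_num(arr, t_seconds):
--     wnd_goose_pkt_num = []
--     t, k = 0, 0
--     for i in range(len(arr)):
--
--         while t<t_seconds:
--             if (i-k) >= 0:
--                 t += arr[i]-arr[i-k]
--                 k +=1
--             else:
--                 break
--         wnd_goose_pkt_num.append(k)
--         t, k = 0, 0
--     return wnd_goose_pkt_num
-- ===== SOURCE B (Python) =====
-- def get_wnd_goose_pkt_num(arr, t_seconds):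
--     P = [0]
--     for x in arr:
--         P.append(P[-1] + x)
--     out = []
--     for i, x in enumerate(arr):
--         out.append(next((k for k in range(i + 1)
--                          if k * x - (P[i + 1] - P[i + 1 - k]) >= t_seconds),
--                         i + 1))
--     return out
-- ===== Notes on version B (the rewrite author's own statement) =====
-- stated objective: alternative
-- what changed: B precomputes a prefix-sum table once and, per index, picks the first window size k whose closed-form cumulative inter-arrival sum k*arr[i]-(P[i+1]-P[i+1-k]) reaches the threshold, instead of A's per-index incremental re-accumulation in a while loop.
import Mathlib
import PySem

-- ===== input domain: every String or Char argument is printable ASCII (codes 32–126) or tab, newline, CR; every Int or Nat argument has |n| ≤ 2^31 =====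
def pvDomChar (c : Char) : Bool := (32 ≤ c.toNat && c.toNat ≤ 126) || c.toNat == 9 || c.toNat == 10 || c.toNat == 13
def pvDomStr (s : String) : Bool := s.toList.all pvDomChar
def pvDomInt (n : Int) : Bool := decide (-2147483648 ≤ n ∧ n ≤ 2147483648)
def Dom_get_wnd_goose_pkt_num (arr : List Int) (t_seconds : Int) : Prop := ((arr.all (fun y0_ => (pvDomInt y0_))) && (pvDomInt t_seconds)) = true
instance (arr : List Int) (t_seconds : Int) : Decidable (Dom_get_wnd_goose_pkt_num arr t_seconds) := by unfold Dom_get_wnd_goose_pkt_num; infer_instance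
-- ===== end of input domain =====

-- B replaces A's per-index incremental re-accumulation of the inter-arrival sum by a
-- prefix-sum table and a closed-form test per candidate window size (objective: alternative).

-- ===== PORT A =====
-- inner `while` loop of A: state (t, k); terminates because k grows toward i+1
def pvLoopA (arr : List Int) (ts : Int) (i : Nat) (t : Int) (k : Nat) : Nat :=
  if t < ts then
    if (0 : Int) ≤ (i : Int) - (k : Int) then
      pvLoopA arr ts i (t + arr.getD i 0 - arr.getD (i - k) 0) (k + 1)
    else k
  else k
termination_by i + 1 - k
decreasing_by omega

def get_wnd_goose_pkt_num (arr : List Int) (t_seconds : Int) : List Int :=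
  (List.range arr.length).map (fun i => ((pvLoopA arr t_seconds i 0 0 : Nat) : Int))

-- ===== PORT B =====
def get_wnd_goose_pkt_num_alt (arr : List Int) (t_seconds : Int) : List Int :=
  let P := arr.foldl (fun p x => p ++ [p.getLast! + x]) [0]
  (PySem.List.enumerate arr).map (fun ix =>
    let i := ix.1.toNat
    let x := ix.2
    match (List.range (i + 1)).find?
        (fun (k : Nat) => decide ((k : Int) * x - (P.getD (i + 1) 0 - P.getD (i + 1 - k) 0) ≥ t_seconds)) with
    | some k => (k : Int)
    | none => (i : Int) + 1)

-- ===== PRECONDITION & SPEC =====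
def Spec_get_wnd_goose_pkt_num (arr : List Int) (t_seconds : Int) (out : List Int) : Prop := out = get_wnd_goose_pkt_num_alt arr t_seconds
instance (arr : List Int) (t_seconds : Int) (out : List Int) : Decidable (Spec_get_wnd_goose_pkt_num arr t_seconds out) := by unfold Spec_get_wnd_goose_pkt_num; infer_instance

-- ===== CLAIM (what is proved, stated in full; the proofs are below) =====
def Claim_equal_get_wnd_goose_pkt_num : Prop := ∀ (arr : List Int) (t_seconds : Int), Dom_get_wnd_goose_pkt_num arr t_seconds → Spec_get_wnd_goose_pkt_num arr t_seconds (get_wnd_goose_pkt_num arr t_seconds)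

-- ===== LEMMAS AND PROOFS =====

-- the cumulative value of A's inner loop after k steps, in closed form
def pvT (arr : List Int) (i k : Nat) : Int :=
  (k : Int) * arr.getD i 0 - (((arr.take (i + 1)).sum) - ((arr.take (i + 1 - k)).sum))

-- scan of running sums, to characterise B's prefix list
def pvSums (c : Int) : List Int → List Int
  | [] => []
  | x :: xs => (c + x) :: pvSums (c + x) xs

theorem pvFoldl_pfx (arr : List Int) : ∀ (acc : List Int), acc ≠ [] →
    arr.foldl (fun p x => p ++ [p.getLast! + x]) acc = acc ++ pvSums acc.getLast! arr := by
  induction arr with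
  | nil => intro acc _; simp [pvSums]
  | cons x xs ih =>
    intro acc h
    simp only [List.foldl_cons, pvSums]
    rw [ih (acc ++ [acc.getLast! + x]) (by simp)]
    simp

theorem pvSums_getD (arr : List Int) : ∀ (c : Int) (j : Nat), j < arr.length →
    (pvSums c arr).getD j 0 = c + (arr.take (j + 1)).sum := by
  induction arr with
  | nil => intro c j h; simp at h
  | cons x xs ih =>
    intro c j h
    cases j with
    | zero => simp [pvSums]
    | succ m =>
      simp only [pvSums, List.getD_cons_succ, List.take_succ_cons, List.sum_cons]
      rw [ih (c + x) m (by simpa using h)]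
      ring

theorem pvP_getD (arr : List Int) (j : Nat) (h : j ≤ arr.length) :
    (arr.foldl (fun p x => p ++ [p.getLast! + x]) [0]).getD j 0 = (arr.take j).sum := by
  rw [pvFoldl_pfx arr [0] (by simp)]
  have h0 : ([(0 : Int)] ++ pvSums ([(0 : Int)].getLast!) arr) = (0 : Int) :: pvSums 0 arr := rfl
  rw [h0]
  cases j with
  | zero => simp
  | succ m =>
    rw [List.getD_cons_succ, pvSums_getD arr 0 m (by omega)]
    simp

theorem pvTake_succ_sum (arr : List Int) (j : Nat) (h : j < arr.length) :
    (arr.take (j + 1)).sum = (arr.take j).sum + arr.getD j 0 := by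
  rw [List.getD_eq_getElem _ _ h, List.take_add_one, List.sum_append]
  have : arr[j]? = some arr[j] := List.getElem?_eq_getElem h
  simp [this]

theorem pvT_step (arr : List Int) (i k : Nat) (hk : k ≤ i) (hi : i < arr.length) :
    pvT arr i (k + 1) = pvT arr i k + arr.getD i 0 - arr.getD (i - k) 0 := by
  unfold pvT
  have h1 : i + 1 - (k + 1) = i - k := by omega
  have h2 : (i - k) + 1 = i + 1 - k := by omega
  have h3 : (arr.take ((i - k) + 1)).sum = (arr.take (i - k)).sum + arr.getD (i - k) 0 :=
    pvTake_succ_sum arr (i - k) (by omega)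
  rw [h1]
  rw [h2] at h3
  push_cast
  linarith [h3]

theorem pvLoopA_eq (arr : List Int) (ts : Int) (i : Nat) (hi : i < arr.length) :
    ∀ (k : Nat), k ≤ i + 1 →
    pvLoopA arr ts i (pvT arr i k) k
      = ((List.range' k (i + 1 - k)).find? (fun k' => decide (pvT arr i k' ≥ ts))).getD (i + 1) := by
  intro k hk
  induction hfuel : i + 1 - k generalizing k with
  | zero =>
    have hk' : k = i + 1 := by omega
    rw [pvLoopA]
    subst hk'
    by_cases ht : pvT arr i (i + 1) < ts
    · simp [ht, List.range']
    · simp [ht, List.range']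
  | succ m ihm =>
    rw [pvLoopA]
    have hkle : k ≤ i := by omega
    have hr : List.range' k (m + 1) = k :: List.range' (k + 1) m := by rw [List.range'_succ]
    by_cases ht : pvT arr i k < ts
    · have hnot : ¬ (pvT arr i k ≥ ts) := by omega
      simp only [ht, if_true, show (0:Int) ≤ (i:Int) - (k:Int) by omega, if_true]
      rw [← pvT_step arr i k hkle hi]
      rw [ihm (k + 1) (by omega) (by omega), hr]
      simp [hnot]
    · have hyes : pvT arr i k ≥ ts := by omega
      simp only [ht, if_false]
      rw [hr]
      simp [hyes]

theorem pvFind?_congr {α : Type} (l : List α) (p q : α → Bool) (h : ∀ a ∈ l, p a = q a) :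
    l.find? p = l.find? q := by
  induction l with
  | nil => rfl
  | cons x xs ih =>
    simp only [List.find?_cons]
    rw [h x (by simp)]
    cases q x with
    | true => rfl
    | false => exact ih (fun a ha => h a (by simp [ha]))

theorem pvEnumerate_getElem (arr : List Int) (j : Nat) (h : j < arr.length) :
    (PySem.List.enumerate arr)[j]'(by simpa [PySem.List.length_enumerate] using h) = ((j : Int), arr[j]) := by
  simpa using PySem.List.getElem_enumerate (xs := arr) (s := 0) (k := j)
    (h := by simpa [PySem.List.length_enumerate] using h)

theorem pvPointwise (arr : List Int) (ts : Int) (i : Nat) (hi : i < arr.length) :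
    ((pvLoopA arr ts i 0 0 : Nat) : Int)
      = (match (List.range (i + 1)).find?
            (fun (k : Nat) => decide ((k : Int) * arr[i] -
              (((arr.foldl (fun p x => p ++ [p.getLast! + x]) [0]).getD (i + 1) 0)
                - ((arr.foldl (fun p x => p ++ [p.getLast! + x]) [0]).getD (i + 1 - k) 0)) ≥ ts)) with
        | some k => (k : Int)
        | none => (i : Int) + 1) := by
  have h0 : (0 : Int) = pvT arr i 0 := by simp [pvT]
  have hfind :
      (List.range (i + 1)).find?
          (fun (k : Nat) => decide ((k : Int) * arr[i] -
            (((arr.foldl (fun p x => p ++ [p.getLast! + x]) [0]).getD (i + 1) 0)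
              - ((arr.foldl (fun p x => p ++ [p.getLast! + x]) [0]).getD (i + 1 - k) 0)) ≥ ts))
        = (List.range (i + 1)).find? (fun k' => decide (pvT arr i k' ≥ ts)) := by
    apply pvFind?_congr
    intro k hkmem
    have hk : k < i + 1 := List.mem_range.mp hkmem
    rw [pvP_getD arr (i + 1) (by omega), pvP_getD arr (i + 1 - k) (by omega)]
    simp [pvT, List.getElem?_eq_getElem hi]
  rw [hfind]
  rw [h0, pvLoopA_eq arr ts i hi 0 (by omega), ← List.range_eq_range']
  cases hf : (List.range (i + 1)).find? (fun k' => decide (pvT arr i k' ≥ ts)) with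
  | none => simp [Option.getD]
  | some k =>
    have : k ∈ List.range (i + 1) := List.mem_of_find?_eq_some hf
    simp [Option.getD]

-- ===== VERDICT (by name: the statement is the Claim_ definition above) =====
theorem get_wnd_goose_pkt_num_spec : Claim_equal_get_wnd_goose_pkt_num := by
  intro arr ts _
  unfold Spec_get_wnd_goose_pkt_num get_wnd_goose_pkt_num get_wnd_goose_pkt_num_alt
  apply List.ext_getElem
  · simp [PySem.List.length_enumerate]
  · intro j h1 h2
    simp only [List.getElem_map, List.getElem_range]
    have hj : j < arr.length := by simpa using h1
    rw [pvEnumerate_getElem arr j hj]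
    simpa using pvPointwise arr ts j hj
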